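-- pv_equiv track=rewrite | github.com/bpiv400/eBay | trans_probs/mvp/prep3.py | get_observed_offrs
-- ===== SOURCE A (Python) =====
-- def get_observed_offrs(turn):
--     '''
--     Description: Generates a list of the offers that have been observed
--     thusfar, including the current offer
--     '''
--     turn_num = int(turn[1])
--     turn_type = turn[0]
--     offer_set = []
--     for i in range(turn_num + 1):
--         offer_set.append('offr_b' + str(i))
--         if i < turn_num:
--             offer_set.append('offr_s' + str(i))
--         elif turn_type == 's':
--             offer_set.append('offr_s' + str(i))
--     offer_set.append('start_price_usd')
--     return offer_set
-- ===== SOURCE B (Python) =====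
-- def _merge(b, s):
--     if not b:
--         return list(s)
--     if not s:
--         return list(b)
--     return [b[0], s[0]] + _merge(b[1:], s[1:])
--
--
-- def get_observed_offrs(turn):
--     turn_num = int(turn[1])
--     turn_type = turn[0]
--     b = ['offr_b' + str(i) for i in range(turn_num + 1)]
--     s = ['offr_s' + str(i) for i in range(turn_num + 1 if turn_type == 's' else turn_num)]
--     return _merge(b, s) + ['start_price_usd']
-- ===== Notes on version B (the rewrite author's own statement) =====
-- stated objective: alternative
-- what changed: A builds the labels in one indexed loop with a conditional seller-append per iteration; B builds the buyer and seller label lists separately by comprehensions and interleaves them with a recursive zip_longest-style merge.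
import Mathlib
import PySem

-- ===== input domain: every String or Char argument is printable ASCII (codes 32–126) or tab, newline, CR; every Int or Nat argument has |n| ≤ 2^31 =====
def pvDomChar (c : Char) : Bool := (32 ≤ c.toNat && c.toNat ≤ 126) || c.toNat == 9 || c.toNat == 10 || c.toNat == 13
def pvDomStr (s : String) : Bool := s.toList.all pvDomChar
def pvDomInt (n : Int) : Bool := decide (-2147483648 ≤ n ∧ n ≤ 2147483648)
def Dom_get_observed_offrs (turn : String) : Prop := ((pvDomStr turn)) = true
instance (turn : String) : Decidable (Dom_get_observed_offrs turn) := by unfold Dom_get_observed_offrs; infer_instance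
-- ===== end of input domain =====

-- B replaces A's single indexed loop with branch-dependent appends by two comprehension-built
-- label lists merged by a recursive zip_longest-style interleave (objective: alternative decomposition).

-- ===== PORT A =====
-- literal port of A: parse turn[1] as int, then one loop over range(turn_num+1) appending to offer_set
def get_observed_offrs (turn : String) : List String :=
  match PySem.Str.pyGet? turn 1 with
  | none => []                                   -- IndexError (excluded by Pre_)
  | some t1 =>
    match PySem.Int.ofChars? [t1] with
    | none => []                                 -- ValueError (excluded by Pre_)
    | some turn_num =>
      let turn_type := (PySem.Str.pyGet? turn 0).getD ' '   -- in range whenever turn[1] is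
      let offer_set : List String :=
        (PySem.List.pyRange 0 (turn_num + 1) 1).foldl
          (fun acc i =>
            let acc := acc ++ ["offr_b" ++ PySem.Int.toStr i]
            if i < turn_num then acc ++ ["offr_s" ++ PySem.Int.toStr i]
            else if turn_type = 's' then acc ++ ["offr_s" ++ PySem.Int.toStr i]
            else acc) []
      offer_set ++ ["start_price_usd"]

-- ===== PORT B =====
-- zip_longest-style interleave of the two label lists (B's helper _merge)
def pvMerge : List String → List String → List String
  | [], s => s
  | b, [] => b
  | b :: bs, s :: ss => b :: s :: pvMerge bs ss

def get_observed_offrs_alt (turn : String) : List String :=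
  match PySem.Str.pyGet? turn 1 with
  | none => []
  | some t1 =>
    match PySem.Int.ofChars? [t1] with
    | none => []
    | some turn_num =>
      let turn_type := (PySem.Str.pyGet? turn 0).getD ' '
      let b := (PySem.List.pyRange 0 (turn_num + 1) 1).map (fun i => "offr_b" ++ PySem.Int.toStr i)
      let s := (PySem.List.pyRange 0 (if turn_type = 's' then turn_num + 1 else turn_num) 1).map
                 (fun i => "offr_s" ++ PySem.Int.toStr i)
      pvMerge b s ++ ["start_price_usd"]

-- ===== PRECONDITION & SPEC =====
-- A raises (IndexError/ValueError) exactly when turn has no index 1 or turn[1] is not a decimal digit;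
-- Pre_ admits exactly the inputs on which A returns.
def Pre_get_observed_offrs (turn : String) : Prop :=
  ((PySem.Str.pyGet? turn 1).any
    (fun c => decide (c ∈ ['0','1','2','3','4','5','6','7','8','9']))) = true
instance (turn : String) : Decidable (Pre_get_observed_offrs turn) := by
  unfold Pre_get_observed_offrs; infer_instance

def pvWitness_get_observed_offrs : String := "b2"

def Spec_get_observed_offrs (turn : String) (out : List String) : Prop := out = get_observed_offrs_alt turn
instance (turn : String) (out : List String) : Decidable (Spec_get_observed_offrs turn out) := by unfold Spec_get_observed_offrs; infer_instance

-- ===== CLAIM (what is proved, stated in full; the proofs are below) =====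
def Claim_equal_get_observed_offrs : Prop := ∀ (turn : String), Dom_get_observed_offrs turn → Pre_get_observed_offrs turn → Spec_get_observed_offrs turn (get_observed_offrs turn)

-- ===== LEMMAS AND PROOFS =====

-- the two post-parse computations agree for every digit value and either loop branch
theorem pvCore_eq (n : Int) (hn : 0 ≤ n) (h9 : n ≤ 9) (ts : Char) :
    ((PySem.List.pyRange 0 (n + 1) 1).foldl
      (fun acc i =>
        let acc := acc ++ ["offr_b" ++ PySem.Int.toStr i]
        if i < n then acc ++ ["offr_s" ++ PySem.Int.toStr i]
        else if ts = 's' then acc ++ ["offr_s" ++ PySem.Int.toStr i]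
        else acc) []) ++ ["start_price_usd"]
    = pvMerge ((PySem.List.pyRange 0 (n + 1) 1).map (fun i => "offr_b" ++ PySem.Int.toStr i))
        ((PySem.List.pyRange 0 (if ts = 's' then n + 1 else n) 1).map
          (fun i => "offr_s" ++ PySem.Int.toStr i)) ++ ["start_price_usd"] := by
  by_cases hs : ts = 's' <;> simp [hs] <;> interval_cases n <;> decide

-- ===== VERDICT (by name: the statement is the Claim_ definition above) =====
theorem get_observed_offrs_spec : Claim_equal_get_observed_offrs := by
  intro turn _ hpre
  unfold Spec_get_observed_offrs get_observed_offrs get_observed_offrs_alt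
  unfold Pre_get_observed_offrs at hpre
  cases hg : PySem.Str.pyGet? turn 1 with
  | none => rfl
  | some c1 =>
    rw [hg] at hpre
    simp only [Option.any_some, decide_eq_true_eq] at hpre
    fin_cases hpre <;>
      simp only [(by decide : PySem.Int.ofChars? ['0'] = some (0 : Int)),
        (by decide : PySem.Int.ofChars? ['1'] = some (1 : Int)),
        (by decide : PySem.Int.ofChars? ['2'] = some (2 : Int)),
        (by decide : PySem.Int.ofChars? ['3'] = some (3 : Int)),
        (by decide : PySem.Int.ofChars? ['4'] = some (4 : Int)),
        (by decide : PySem.Int.ofChars? ['5'] = some (5 : Int)),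
        (by decide : PySem.Int.ofChars? ['6'] = some (6 : Int)),
        (by decide : PySem.Int.ofChars? ['7'] = some (7 : Int)),
        (by decide : PySem.Int.ofChars? ['8'] = some (8 : Int)),
        (by decide : PySem.Int.ofChars? ['9'] = some (9 : Int))] <;>
      exact pvCore_eq _ (by decide) (by decide) _
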